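-- pv_equiv track=rewrite | github.com/mlesnews/lumina-oss | scripts/python/project_manager_agent.py | _calculate_batch_priority
-- ===== SOURCE A (Python) =====
-- from typing import Dict, Any, List, Optional
--
-- def _calculate_batch_priority(tasks: List[Dict[str, Any]]) -> str:
--     """Calculate batch priority based on task priorities"""
--     if not tasks:
--         return "medium"
--
--     priorities = [t.get("priority", "medium") for t in tasks]
--     if "critical" in priorities:
--         return "critical"
--     elif "high" in priorities:
--         return "high"
--     elif "medium" in priorities:
--         return "medium"
--     else:
--         return "low"
-- ===== SOURCE B (Python) =====
-- _RANK = {"critical": 3, "high": 2, "medium": 1}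
-- _LABEL = {3: "critical", 2: "high", 1: "medium", 0: "low"}
--
-- def _calculate_batch_priority(tasks):
--     """Calculate batch priority based on task priorities"""
--     if not tasks:
--         return "medium"
--     best = 0
--     for t in tasks:
--         best = max(best, _RANK.get(t.get("priority", "medium"), 0))
--     return _LABEL[best]
-- ===== Notes on version B (the rewrite author's own statement) =====
-- stated objective: idiomatic
-- what changed: Replaces the materialised priorities list plus a chain of three membership scans with a single running-max pass over numeric ranks, mapped back to a label at the end.
import Mathlib
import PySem

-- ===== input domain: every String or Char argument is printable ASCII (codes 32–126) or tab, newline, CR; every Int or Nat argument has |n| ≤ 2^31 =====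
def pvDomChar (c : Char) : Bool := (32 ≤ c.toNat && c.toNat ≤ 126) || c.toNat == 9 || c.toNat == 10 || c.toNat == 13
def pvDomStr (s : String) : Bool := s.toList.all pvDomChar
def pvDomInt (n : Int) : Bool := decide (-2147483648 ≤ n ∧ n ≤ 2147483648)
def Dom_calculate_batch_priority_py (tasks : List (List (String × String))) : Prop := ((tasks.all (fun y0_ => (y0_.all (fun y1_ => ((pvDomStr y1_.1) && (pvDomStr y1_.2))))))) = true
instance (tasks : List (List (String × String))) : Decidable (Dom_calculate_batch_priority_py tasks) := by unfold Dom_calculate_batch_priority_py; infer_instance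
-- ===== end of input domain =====

-- B replaces A's materialised priorities list and three membership scans by one
-- running-max pass over numeric ranks (idiomatic, same cost).

-- ===== PORT A =====
def calculate_batch_priority_py (tasks : List (List (String × String))) : String :=
  if tasks = [] then "medium"
  else
    let priorities := tasks.map (fun t => (PySem.Dict.mk t).getD "priority" "medium")
    if priorities.contains "critical" then "critical"
    else if priorities.contains "high" then "high"
    else if priorities.contains "medium" then "medium"
    else "low"

-- ===== PORT B =====
-- rank map _RANK with .get(·, 0)
def pvRank (s : String) : Nat :=
  if s = "critical" then 3 else if s = "high" then 2 else if s = "medium" then 1 else 0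

-- label map _LABEL
def pvLabel (n : Nat) : String :=
  if n = 3 then "critical" else if n = 2 then "high" else if n = 1 then "medium" else "low"

def calculate_batch_priority_py_alt (tasks : List (List (String × String))) : String :=
  if tasks = [] then "medium"
  else
    pvLabel (tasks.foldl (fun best t => max best (pvRank ((PySem.Dict.mk t).getD "priority" "medium"))) 0)

-- ===== PRECONDITION & SPEC =====
def Spec_calculate_batch_priority_py (tasks : List (List (String × String))) (out : String) : Prop := out = calculate_batch_priority_py_alt tasks
instance (tasks : List (List (String × String))) (out : String) : Decidable (Spec_calculate_batch_priority_py tasks out) := by unfold Spec_calculate_batch_priority_py; infer_instance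

-- ===== CLAIM (what is proved, stated in full; the proofs are below) =====
def Claim_equal_calculate_batch_priority_py : Prop := ∀ (tasks : List (List (String × String))), Dom_calculate_batch_priority_py tasks → Spec_calculate_batch_priority_py tasks (calculate_batch_priority_py tasks)

-- ===== LEMMAS AND PROOFS =====

def pvMaxRank (ps : List String) : Nat := ps.foldl (fun b p => max b (pvRank p)) 0

theorem pvFoldl_max_acc (ps : List String) (acc : Nat) :
    ps.foldl (fun b p => max b (pvRank p)) acc = max acc (pvMaxRank ps) := by
  induction ps generalizing acc with
  | nil => simp [pvMaxRank]
  | cons p ps ih =>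
    simp only [pvMaxRank, List.foldl]
    rw [ih (max acc (pvRank p)), ih (max 0 (pvRank p))]
    omega

theorem pvMaxRank_cons (p : String) (ps : List String) :
    pvMaxRank (p :: ps) = max (pvRank p) (pvMaxRank ps) := by
  simp only [pvMaxRank, List.foldl]
  rw [pvFoldl_max_acc]
  simp only [pvMaxRank]
  omega

theorem pvRank_le (p : String) : pvRank p ≤ 3 := by
  unfold pvRank; split_ifs <;> omega

theorem pvMaxRank_le (ps : List String) : pvMaxRank ps ≤ 3 := by
  induction ps with
  | nil => simp [pvMaxRank]
  | cons p ps ih =>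
    rw [pvMaxRank_cons]
    have := pvRank_le p
    omega

theorem pvMaxRank_ge_iff (ps : List String) (k : Nat) (hk : 1 ≤ k) :
    k ≤ pvMaxRank ps ↔ ∃ p ∈ ps, k ≤ pvRank p := by
  induction ps with
  | nil => simp [pvMaxRank]; omega
  | cons p ps ih =>
    rw [pvMaxRank_cons]
    simp only [List.mem_cons]
    constructor
    · intro h
      by_cases hp : k ≤ pvRank p
      · exact ⟨p, Or.inl rfl, hp⟩
      · have : k ≤ pvMaxRank ps := by omega
        obtain ⟨q, hq, hqr⟩ := ih.mp this
        exact ⟨q, Or.inr hq, hqr⟩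
    · rintro ⟨q, hq | hq, hqr⟩
      · subst hq; omega
      · have := ih.mpr ⟨q, hq, hqr⟩; omega

theorem pvRank_ge3 (p : String) (h : 3 ≤ pvRank p) : p = "critical" := by
  unfold pvRank at h; split_ifs at h <;> first | assumption | omega

theorem pvRank_ge2 (p : String) (h : 2 ≤ pvRank p) : p = "critical" ∨ p = "high" := by
  unfold pvRank at h; split_ifs at h <;> first | (left; assumption) | (right; assumption) | omega

theorem pvRank_ge1 (p : String) (h : 1 ≤ pvRank p) :
    p = "critical" ∨ p = "high" ∨ p = "medium" := by
  unfold pvRank at h; split_ifs at h <;> simp_all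

theorem pvChain_eq (ps : List String) :
    (if ps.contains "critical" then "critical"
     else if ps.contains "high" then "high"
     else if ps.contains "medium" then "medium" else "low") = pvLabel (pvMaxRank ps) := by
  have hle := pvMaxRank_le ps
  by_cases hc : "critical" ∈ ps
  · have h3 : 3 ≤ pvMaxRank ps :=
      (pvMaxRank_ge_iff ps 3 (by omega)).mpr ⟨"critical", hc, by simp [pvRank]⟩
    have : pvMaxRank ps = 3 := by omega
    simp [hc, this, pvLabel]
  · by_cases hh : "high" ∈ ps
    · have h2 : 2 ≤ pvMaxRank ps :=
        (pvMaxRank_ge_iff ps 2 (by omega)).mpr ⟨"high", hh, by simp [pvRank]⟩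
      have h3 : ¬ 3 ≤ pvMaxRank ps := by
        intro h
        obtain ⟨q, hq, hqr⟩ := (pvMaxRank_ge_iff ps 3 (by omega)).mp h
        exact hc (pvRank_ge3 q hqr ▸ hq)
      have : pvMaxRank ps = 2 := by omega
      simp [hc, hh, this, pvLabel]
    · by_cases hm : "medium" ∈ ps
      · have h1 : 1 ≤ pvMaxRank ps :=
          (pvMaxRank_ge_iff ps 1 (by omega)).mpr ⟨"medium", hm, by simp [pvRank]⟩
        have h2 : ¬ 2 ≤ pvMaxRank ps := by
          intro h
          obtain ⟨q, hq, hqr⟩ := (pvMaxRank_ge_iff ps 2 (by omega)).mp h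
          rcases pvRank_ge2 q hqr with h | h
          · exact hc (h ▸ hq)
          · exact hh (h ▸ hq)
        have : pvMaxRank ps = 1 := by omega
        simp [hc, hh, hm, this, pvLabel]
      · have h1 : ¬ 1 ≤ pvMaxRank ps := by
          intro h
          obtain ⟨q, hq, hqr⟩ := (pvMaxRank_ge_iff ps 1 (by omega)).mp h
          rcases pvRank_ge1 q hqr with h | h | h
          · exact hc (h ▸ hq)
          · exact hh (h ▸ hq)
          · exact hm (h ▸ hq)
        have : pvMaxRank ps = 0 := by omega
        simp [hc, hh, hm, this, pvLabel]

-- ===== VERDICT (by name: the statement is the Claim_ definition above) =====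
theorem calculate_batch_priority_py_spec : Claim_equal_calculate_batch_priority_py := by
  intro tasks _
  unfold Spec_calculate_batch_priority_py calculate_batch_priority_py calculate_batch_priority_py_alt
  by_cases h : tasks = []
  · simp [h]
  · simp only [h, if_false]
    rw [pvChain_eq]
    congr 1
    simp [pvMaxRank, List.foldl_map]
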